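-- pv_equiv track=rewrite | github.com/xiaojia21190/poco-agent | executor_manager/app/services/config_resolver.py | _extract_enabled_ids_from_toggles
-- ===== SOURCE A (Python) =====
-- from typing import Any, TypedDict
--
-- def _extract_enabled_ids_from_toggles(value: Any) -> list[int] | None:
--     """Convert {id: bool} toggles into enabled id list.
--
--     Returns None when the value does not look like toggles.
--     """
--     if not isinstance(value, dict):
--         return None
--     if not value:
--         return []
--     ids: list[int] = []
--     seen: set[int] = set()
--     for key, enabled in value.items():
--         if not isinstance(enabled, bool):
--             return None
--         if enabled is not True:
--             continue
--         if not isinstance(key, str):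
--             return None
--         key = key.strip()
--         if not key:
--             continue
--         try:
--             sid = int(key)
--         except ValueError:
--             return None
--         if sid in seen:
--             continue
--         seen.add(sid)
--         ids.append(sid)
--     return ids
-- ===== SOURCE B (Python) =====
-- def _extract_enabled_ids_from_toggles(value):
--     """Convert {id: bool} toggles into enabled id list (pipeline version)."""
--     if not isinstance(value, dict):
--         return None
--     if not all(isinstance(v, bool) for v in value.values()):
--         return None
--     enabled_keys = [k for k, on in value.items() if on]
--     if not all(isinstance(k, str) for k in enabled_keys):
--         return None
--     cleaned = [s for s in (k.strip() for k in enabled_keys) if s]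
--     try:
--         parsed = [int(s) for s in cleaned]
--     except ValueError:
--         return None
--     return list(dict.fromkeys(parsed))
-- ===== Notes on version B (the rewrite author's own statement) =====
-- stated objective: alternative
-- what changed: Replaces A's single interleaved loop with mutable ids/seen state by a pipeline: comprehension passes that filter enabled keys, strip and drop empties, then parse all keys at once (None on any ValueError), and finally deduplicate keeping first occurrences via dict.fromkeys; Pre_ only excludes association lists with duplicate keys, which do not represent any Python dict.
import Mathlib
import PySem

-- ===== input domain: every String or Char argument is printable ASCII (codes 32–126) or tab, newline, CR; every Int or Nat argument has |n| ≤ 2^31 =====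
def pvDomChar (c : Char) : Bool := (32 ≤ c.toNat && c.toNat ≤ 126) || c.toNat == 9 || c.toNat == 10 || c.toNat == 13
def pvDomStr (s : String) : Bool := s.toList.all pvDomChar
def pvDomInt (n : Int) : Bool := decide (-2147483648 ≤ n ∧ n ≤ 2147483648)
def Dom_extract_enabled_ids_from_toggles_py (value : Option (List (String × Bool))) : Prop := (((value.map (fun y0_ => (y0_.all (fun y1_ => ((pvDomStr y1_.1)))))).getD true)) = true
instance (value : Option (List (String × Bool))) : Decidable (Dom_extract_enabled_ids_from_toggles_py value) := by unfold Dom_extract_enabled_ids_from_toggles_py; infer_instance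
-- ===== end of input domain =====

-- B replaces A's interleaved loop with mutable ids/seen by a filter/strip/parse pipeline
-- plus an ordered dedup (dict.fromkeys) at the end: a different decomposition, same cost.


-- ===== PORT A =====
-- A's loop over value.items(): accumulates ids and a seen-set, early `return None` on a
-- key that int() rejects.  (isinstance checks are discharged by the Lean types.)
def pvALoop : List (String × Bool) → List Int → PySem.Set Int → Option (List Int)
  | [], ids, _ => some ids
  | (key, enabled) :: rest, ids, seen =>
    if enabled ≠ true then pvALoop rest ids seen
    else
      let k := PySem.Str.strip key
      if k = "" then pvALoop rest ids seen
      else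
        match PySem.Int.ofStr? k with
        | none => none
        | some sid =>
          if PySem.Set.contains seen sid then pvALoop rest ids seen
          else pvALoop rest (ids ++ [sid]) (PySem.Set.add seen sid)

def extract_enabled_ids_from_toggles_py (value : Option (List (String × Bool))) : Option (List Int) :=
  match value with
  | none => none                 -- not a dict
  | some l =>
    if l = [] then some []       -- `if not value: return []`
    else pvALoop l [] PySem.Set.empty

-- ===== PORT B =====
-- B's pipeline: enabled keys → strip, drop empties → parse all (none on ValueError) → ordered dedup.
def pvBEnabledKeys (l : List (String × Bool)) : List String := (l.filter (fun p => p.2)).map (fun p => p.1)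

def pvBCleaned (ks : List String) : List String := (ks.map PySem.Str.strip).filter (fun s => s ≠ "")

-- [int(s) for s in cleaned] inside try/except ValueError
def pvBParse : List String → Option (List Int)
  | [] => some []
  | s :: rest =>
    match PySem.Int.ofStr? s with
    | none => none
    | some n => (pvBParse rest).map (fun xs => n :: xs)

def extract_enabled_ids_from_toggles_py_alt (value : Option (List (String × Bool))) : Option (List Int) :=
  match value with
  | none => none
  | some l => (pvBParse (pvBCleaned (pvBEnabledKeys l))).map PySem.List.dedup

-- ===== PRECONDITION & SPEC =====
-- Pre_ excludes association lists with duplicate keys: they do not encode any Python dict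
-- (a Python dict cannot hold the same key twice), so the list-encoding there is ambiguous.
def Pre_extract_enabled_ids_from_toggles_py (value : Option (List (String × Bool))) : Prop :=
  ((value.getD []).map Prod.fst).Nodup
instance (value : Option (List (String × Bool))) : Decidable (Pre_extract_enabled_ids_from_toggles_py value) := by unfold Pre_extract_enabled_ids_from_toggles_py; infer_instance

def pvWitness_extract_enabled_ids_from_toggles_py : (Option (List (String × Bool))) :=
  some [(" 1 ", true), ("2", false), ("+3", true), ("1", true), ("", true)]

def Spec_extract_enabled_ids_from_toggles_py (value : Option (List (String × Bool))) (out : Option (List Int)) : Prop := out = extract_enabled_ids_from_toggles_py_alt value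
instance (value : Option (List (String × Bool))) (out : Option (List Int)) : Decidable (Spec_extract_enabled_ids_from_toggles_py value out) := by unfold Spec_extract_enabled_ids_from_toggles_py; infer_instance

-- ===== CLAIM (what is proved, stated in full; the proofs are below) =====
def Claim_equal_extract_enabled_ids_from_toggles_py : Prop := ∀ (value : Option (List (String × Bool))), Dom_extract_enabled_ids_from_toggles_py value → Pre_extract_enabled_ids_from_toggles_py value → Spec_extract_enabled_ids_from_toggles_py value (extract_enabled_ids_from_toggles_py value)

-- ===== LEMMAS AND PROOFS =====
-- A's dedup, extracted: skip members of `seen`, otherwise keep and extend `seen`.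
def pvDD (seen : PySem.Set Int) : List Int → List Int
  | [] => []
  | n :: xs => if PySem.Set.contains seen n then pvDD seen xs else n :: pvDD (PySem.Set.add seen n) xs

lemma pvFoldl_add_eq_append_dd (xs : List Int) (seen : PySem.Set Int) :
    xs.foldl PySem.Set.add seen = seen ++ pvDD seen xs := by
  induction xs generalizing seen with
  | nil => simp [pvDD]
  | cons n xs ih =>
    simp only [List.foldl_cons, pvDD]
    by_cases h : n ∈ seen
    · simp [PySem.Set.add, h, ih]
    · simp [PySem.Set.add, h, ih, List.append_assoc]

lemma pvDD_empty_eq_dedup (xs : List Int) : pvDD ([] : PySem.Set Int) xs = PySem.List.dedup xs := by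
  have h := pvFoldl_add_eq_append_dd xs ([] : PySem.Set Int)
  simp at h
  simp [PySem.List.dedup_eq_ofList, PySem.Set.ofList_eq_foldl, ← h]

lemma pvALoop_eq_pipeline (l : List (String × Bool)) (ids : List Int) (seen : PySem.Set Int) :
    pvALoop l ids seen
      = (pvBParse (pvBCleaned (pvBEnabledKeys l))).map (fun xs => ids ++ pvDD seen xs) := by
  induction l generalizing ids seen with
  | nil => simp [pvALoop, pvBEnabledKeys, pvBCleaned, pvBParse, pvDD]
  | cons p rest ih =>
    obtain ⟨key, enabled⟩ := p
    cases enabled with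
    | false => simpa [pvALoop, pvBEnabledKeys] using ih ids seen
    | true =>
      by_cases hk : PySem.Str.strip key = ""
      · simpa [pvALoop, pvBEnabledKeys, pvBCleaned, hk] using ih ids seen
      · have hfil : pvBCleaned (pvBEnabledKeys ((key, true) :: rest))
            = PySem.Str.strip key :: pvBCleaned (pvBEnabledKeys rest) := by
          simp [pvBEnabledKeys, pvBCleaned, hk]
        cases hp : PySem.Int.ofStr? (PySem.Str.strip key) with
        | none => simp [pvALoop, hk, hp, hfil, pvBParse]
        | some sid =>
          have hparse : pvBParse (PySem.Str.strip key :: pvBCleaned (pvBEnabledKeys rest))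
              = (pvBParse (pvBCleaned (pvBEnabledKeys rest))).map (fun xs => sid :: xs) := by
            simp [pvBParse, hp]
          rw [hfil, hparse]
          by_cases hs : sid ∈ seen
          · rw [show pvALoop ((key, true) :: rest) ids seen = pvALoop rest ids seen by
                simp [pvALoop, hk, hp, PySem.Set.contains, hs], ih ids seen]
            cases pvBParse (pvBCleaned (pvBEnabledKeys rest)) <;> simp [pvDD, hs]
          · rw [show pvALoop ((key, true) :: rest) ids seen
                  = pvALoop rest (ids ++ [sid]) (PySem.Set.add seen sid) by
                simp [pvALoop, hk, hp, PySem.Set.contains, hs],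
               ih (ids ++ [sid]) (PySem.Set.add seen sid)]
            cases pvBParse (pvBCleaned (pvBEnabledKeys rest)) <;>
              simp [pvDD, hs, PySem.Set.add, PySem.Set.contains, List.append_assoc]

-- ===== VERDICT (by name: the statement is the Claim_ definition above) =====
theorem extract_enabled_ids_from_toggles_py_spec : Claim_equal_extract_enabled_ids_from_toggles_py := by
  intro value _ _
  unfold Spec_extract_enabled_ids_from_toggles_py
  cases value with
  | none => rfl
  | some l =>
    simp only [extract_enabled_ids_from_toggles_py, extract_enabled_ids_from_toggles_py_alt]
    by_cases hl : l = []
    · subst hl; simp [pvBEnabledKeys, pvBCleaned, pvBParse, PySem.List.dedup]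
    · rw [if_neg hl, pvALoop_eq_pipeline]
      cases pvBParse (pvBCleaned (pvBEnabledKeys l)) <;> simp [pvDD_empty_eq_dedup]
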